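-- pv_equiv track=rewrite | github.com/musflood/code-katas | proper-parenthetics/parenthetics.py | proper_parenthetics
-- ===== SOURCE A (Python) =====
-- def proper_parenthetics(parens):
--     """Determine if the given string has properly pared parentheses.
--
--     Returns: int, value that corresponds to the following:
--              1 - string is 'open' (not all open parens are closed)
--              0 - string is 'balanced' (equal number of open and closed parens)
--             -1 - string is 'broken' (closing parens before one that opens)
--     """
--     parens_stack = []
--     for ch in parens:
--         if ch == '(':
--             parens_stack.append(ch)
--         if ch == ')':
--             try:
--                 parens_stack.pop()
--             except IndexError:
--                 return -1
--     return 1 if parens_stack else 0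
-- ===== SOURCE B (Python) =====
-- def proper_parenthetics(parens):
--     """Classify parens: build the prefix-balance table, then reduce it."""
--     prefix = []
--     bal = 0
--     for ch in parens:
--         bal += (ch == '(') - (ch == ')')
--         prefix.append(bal)
--     if not prefix:
--         return 0
--     if min(prefix) < 0:
--         return -1
--     return 1 if prefix[-1] > 0 else 0
-- ===== Notes on version B (the rewrite author's own statement) =====
-- stated objective: alternative
-- what changed: Replaced A's early-exit stack-push/pop loop with a build-then-reduce pass: compute the full prefix-balance sequence, then classify from min(prefix) and prefix[-1].
import Mathlib
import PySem

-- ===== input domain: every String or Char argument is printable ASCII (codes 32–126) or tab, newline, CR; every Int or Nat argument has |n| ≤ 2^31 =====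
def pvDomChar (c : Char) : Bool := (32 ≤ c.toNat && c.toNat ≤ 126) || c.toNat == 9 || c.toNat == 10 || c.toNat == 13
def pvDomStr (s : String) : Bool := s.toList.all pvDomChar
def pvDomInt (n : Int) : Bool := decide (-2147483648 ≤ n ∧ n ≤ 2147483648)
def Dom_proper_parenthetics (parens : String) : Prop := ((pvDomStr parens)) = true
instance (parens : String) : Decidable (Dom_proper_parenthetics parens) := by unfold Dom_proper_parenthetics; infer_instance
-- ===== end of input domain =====

-- B replaces A's early-exit stack loop by building the full prefix-balance table and classifying
-- from its minimum and last entry (objective: alternative decomposition, same O(n) cost).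

-- ===== PORT A =====
-- A's for-loop over the string, carrying the stack; ')' pops (empty pop = return -1).
def pvLoopA : List Char → List Char → Int
  | stack, [] => if stack.isEmpty then 0 else 1
  | stack, c :: cs =>
    let stack1 := if c = '(' then stack ++ [c] else stack
    if c = ')' then
      if stack1.isEmpty then -1 else pvLoopA stack1.dropLast cs
    else pvLoopA stack1 cs

def proper_parenthetics (parens : String) : Int := pvLoopA [] parens.toList

-- ===== PORT B =====
-- Source B's per-char delta: (ch == '(') - (ch == ')')
def pvDelta (c : Char) : Int := (if c = '(' then 1 else 0) - (if c = ')' then 1 else 0)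

-- Source B's loop building the prefix-balance list
def pvPrefix : Int → List Char → List Int
  | _, [] => []
  | bal, c :: cs => let b := bal + pvDelta c; b :: pvPrefix b cs

def proper_parenthetics_alt (parens : String) : Int :=
  match pvPrefix 0 parens.toList with
  | [] => 0
  | h :: t =>
    if t.foldl min h < 0 then -1
    else if t.getLastD h > 0 then 1 else 0

-- ===== PRECONDITION & SPEC =====
def Spec_proper_parenthetics (parens : String) (out : Int) : Prop := out = proper_parenthetics_alt parens
instance (parens : String) (out : Int) : Decidable (Spec_proper_parenthetics parens out) := by unfold Spec_proper_parenthetics; infer_instance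

-- ===== CLAIM (what is proved, stated in full; the proofs are below) =====
def Claim_equal_proper_parenthetics : Prop := ∀ (parens : String), Dom_proper_parenthetics parens → Spec_proper_parenthetics parens (proper_parenthetics parens)

-- ===== LEMMAS AND PROOFS =====

-- middle form: running balance with immediate failure on a negative balance
def pvG : Int → List Char → Int
  | bal, [] => if bal > 0 then 1 else 0
  | bal, c :: cs => let b := bal + pvDelta c; if b < 0 then -1 else pvG b cs

lemma pvLoopA_eq_g : ∀ (cs : List Char) (stack : List Char),
    pvLoopA stack cs = pvG (stack.length : Int) cs := by
  intro cs
  induction cs with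
  | nil =>
    intro stack
    cases stack <;> simp [pvLoopA, pvG]
  | cons c cs ih =>
    intro stack
    by_cases hcl : c = ')'
    · subst hcl
      cases stack with
      | nil => simp [pvLoopA, pvG, pvDelta]
      | cons x xs =>
        have hl : pvLoopA (x :: xs) (')' :: cs) = pvLoopA (x :: xs).dropLast cs := by
          simp [pvLoopA]
        have harg : (((x :: xs).dropLast.length : Int)) = ((x :: xs).length : Int) + pvDelta ')' := by
          simp [pvDelta]
        have hneg : ¬ (((x :: xs).length : Int) + pvDelta ')' < 0) := by
          simp [pvDelta]
        rw [hl, ih, harg]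
        conv_rhs => rw [pvG]
        rw [if_neg hneg]
    · by_cases hop : c = '('
      · subst hop
        have hl : pvLoopA stack ('(' :: cs) = pvLoopA (stack ++ ['(']) cs := by
          simp [pvLoopA]
        have hg : pvG (stack.length : Int) ('(' :: cs) = pvG ((stack.length : Int) + 1) cs := by
          conv_lhs => rw [pvG]
          rw [show pvDelta '(' = 1 from by decide]
          rw [if_neg (by omega)]
        have harg : (((stack ++ ['(']).length : Int)) = (stack.length : Int) + 1 := by
          push_cast [List.length_append, List.length_singleton]
          ring
        rw [hl, ih, hg, harg]
      · have hl : pvLoopA stack (c :: cs) = pvLoopA stack cs := by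
          simp [pvLoopA, hop, hcl]
        have hg : pvG (stack.length : Int) (c :: cs) = pvG (stack.length : Int) cs := by
          conv_lhs => rw [pvG]
          simp only [pvDelta, if_neg hop, if_neg hcl]
          rw [if_neg (by simp)]
          simp
        rw [hl, hg, ih]

lemma pvFoldl_min_le (t : List Int) : ∀ (a : Int), t.foldl min a ≤ a := by
  induction t with
  | nil => intro a; simp
  | cons x t ih =>
    intro a
    calc t.foldl min (min a x) ≤ min a x := ih _
    _ ≤ a := min_le_left _ _

lemma pvFoldl_min_min (t : List Int) : ∀ (a h : Int),
    t.foldl min (min a h) = min a (t.foldl min h) := by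
  induction t with
  | nil => intro a h; simp
  | cons x t ih =>
    intro a h
    simp only [List.foldl_cons]
    rw [min_assoc, ih]

lemma pvG_eq_prefix : ∀ (cs : List Char) (bal : Int), 0 ≤ bal →
    pvG bal cs = (match pvPrefix bal cs with
      | [] => if bal > 0 then 1 else 0
      | h :: t => if t.foldl min h < 0 then -1 else if t.getLastD h > 0 then 1 else 0) := by
  intro cs
  induction cs with
  | nil => intro bal _; simp [pvG, pvPrefix]
  | cons c cs ih =>
    intro bal hbal
    simp only [pvG, pvPrefix]
    set b := bal + pvDelta c with hb
    by_cases hneg : b < 0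
    · -- the first prefix entry is negative, so the fold min is negative
      simp only [if_pos hneg]
      cases hp : pvPrefix b cs with
      | nil => simp [hneg]
      | cons h t =>
        have : t.foldl min (min b h) ≤ min b h := pvFoldl_min_le _ _
        have : t.foldl min (min b h) < 0 := lt_of_le_of_lt (le_trans this (min_le_left _ _)) hneg
        simp [this]
    · have hb0 : 0 ≤ b := by omega
      rw [if_neg hneg, ih b hb0]
      cases hp : pvPrefix b cs with
      | nil => simp [hneg]
      | cons h t =>
        simp only [List.foldl_cons, List.getLastD_cons]
        rw [pvFoldl_min_min]
        have : (min b (t.foldl min h) < 0) ↔ (t.foldl min h < 0) := by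
          constructor
          · intro hlt
            rcases lt_or_ge (t.foldl min h) 0 with h1 | h1
            · exact h1
            · exfalso; rw [min_def] at hlt; split_ifs at hlt <;> omega
          · intro hlt; exact lt_of_le_of_lt (min_le_right _ _) hlt
        rw [if_congr this rfl rfl]

-- ===== VERDICT (by name: the statement is the Claim_ definition above) =====
theorem proper_parenthetics_spec : Claim_equal_proper_parenthetics := by
  intro parens _
  unfold Spec_proper_parenthetics proper_parenthetics proper_parenthetics_alt
  have h := pvLoopA_eq_g parens.toList []
  simp only [List.length_nil, Nat.cast_zero] at h
  rw [h, pvG_eq_prefix parens.toList 0 le_rfl]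
  cases pvPrefix 0 parens.toList <;> simp
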